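-- pv_equiv track=rewrite | github.com/PeterJensen/aquaq | solve-24.py | nextLetterCode
-- ===== SOURCE A (Python) =====
-- def nextLetterCode(code, decodings):
--   codes = decodings.keys()
--   nlc = ""
--   for i in range(len(code)):
--     c = code[0:i+1]
--     if c in codes and len(c) > len(nlc):
--       nlc = c
--   return nlc
-- ===== SOURCE B (Python) =====
-- def nextLetterCode(code, decodings):
--   # scan the decoding keys and keep the longest one that is a prefix of code
--   nlc = ""
--   for k in decodings.keys():
--     if code.startswith(k) and len(k) > len(nlc):
--       nlc = k
--   return nlc
-- ===== Notes on version B (the rewrite author's own statement) =====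
-- stated objective: faster
-- what changed: Instead of materializing every prefix code[0:i+1] and testing membership in the key set, B iterates over the decoding keys once and keeps the longest key that is a prefix of code (startswith); the loop ranges over the dictionary, not over prefix lengths, and no slices are built.
import Mathlib
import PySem

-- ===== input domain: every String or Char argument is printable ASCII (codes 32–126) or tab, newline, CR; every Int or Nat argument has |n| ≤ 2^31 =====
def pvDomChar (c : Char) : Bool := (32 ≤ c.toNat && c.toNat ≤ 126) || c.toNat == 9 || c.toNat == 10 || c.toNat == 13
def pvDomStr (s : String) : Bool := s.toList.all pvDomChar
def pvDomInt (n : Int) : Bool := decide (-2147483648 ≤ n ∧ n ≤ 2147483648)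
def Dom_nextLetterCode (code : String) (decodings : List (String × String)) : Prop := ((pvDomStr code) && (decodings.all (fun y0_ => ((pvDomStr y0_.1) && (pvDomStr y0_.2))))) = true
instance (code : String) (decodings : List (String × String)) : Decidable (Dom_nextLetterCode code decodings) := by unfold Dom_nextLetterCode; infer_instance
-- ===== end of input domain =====

-- B scans the decoding keys for the longest key that is a prefix of code, instead of building every prefix of code and looking it up (simpler; no slices built).

-- ===== PORT A =====
def nextLetterCode (code : String) (decodings : List (String × String)) : String :=
  let codes := decodings.map Prod.fst
  (PySem.List.pyRange 0 (PySem.Str.len code) 1).foldl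
    (fun nlc i =>
      let c := PySem.Str.slice code (some 0) (some (i + 1))
      if codes.contains c = true ∧ PySem.Str.len c > PySem.Str.len nlc then c else nlc)
    ""

-- ===== PORT B =====
def nextLetterCode_alt (code : String) (decodings : List (String × String)) : String :=
  (decodings.map Prod.fst).foldl
    (fun nlc k =>
      if PySem.Str.startswith code k = true ∧ PySem.Str.len k > PySem.Str.len nlc then k else nlc)
    ""

-- ===== PRECONDITION & SPEC =====
def Spec_nextLetterCode (code : String) (decodings : List (String × String)) (out : String) : Prop := out = nextLetterCode_alt code decodings
instance (code : String) (decodings : List (String × String)) (out : String) : Decidable (Spec_nextLetterCode code decodings out) := by unfold Spec_nextLetterCode; infer_instance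

-- ===== CLAIM (what is proved, stated in full; the proofs are below) =====
def Claim_equal_nextLetterCode : Prop := ∀ (code : String) (decodings : List (String × String)), Dom_nextLetterCode code decodings → Spec_nextLetterCode code decodings (nextLetterCode code decodings)

-- ===== LEMMAS AND PROOFS =====

/-- A's loop body (the `let` of the port inlined). -/
def pvStepA (code : String) (codes : List String) (nlc : String) (i : Int) : String :=
  if codes.contains (PySem.Str.slice code (some 0) (some (i + 1))) = true ∧
      PySem.Str.len (PySem.Str.slice code (some 0) (some (i + 1))) > PySem.Str.len nlc then
    PySem.Str.slice code (some 0) (some (i + 1))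
  else nlc

/-- B's loop body. -/
def pvStepB (code : String) (nlc k : String) : String :=
  if PySem.Str.startswith code k = true ∧ PySem.Str.len k > PySem.Str.len nlc then k else nlc

lemma nextLetterCode_eq_fold (code : String) (decodings : List (String × String)) :
    nextLetterCode code decodings =
      (PySem.List.pyRange 0 (PySem.Str.len code) 1).foldl
        (pvStepA code (decodings.map Prod.fst)) "" := rfl

lemma nextLetterCode_alt_eq_fold (code : String) (decodings : List (String × String)) :
    nextLetterCode_alt code decodings =
      (decodings.map Prod.fst).foldl (pvStepB code) "" := rfl

lemma slice_toList_of_nonneg (code : String) (i : Int) (hi : 0 ≤ i) :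
    (PySem.Str.slice code (some 0) (some (i + 1))).toList = code.toList.take (i + 1).toNat := by
  rw [PySem.Str.toList_slice, PySem.Chars.slice_eq_listSlice, PySem.List.slice_zero_start,
    PySem.List.slice_to code.toList (by omega)]

lemma foldA_mono (code : String) (codes : List String) (l : List Int) (acc : String) :
    acc.toList.length ≤ ((l.foldl (pvStepA code codes) acc)).toList.length := by
  induction l generalizing acc with
  | nil => simp
  | cons i l ih =>
    simp only [List.foldl_cons]
    refine le_trans ?_ (ih (pvStepA code codes acc i))
    unfold pvStepA
    split
    · rename_i h
      have := h.2
      simp only [PySem.Str.len_eq] at this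
      omega
    · exact le_rfl

lemma foldB_mono (code : String) (l : List String) (acc : String) :
    acc.toList.length ≤ ((l.foldl (pvStepB code) acc)).toList.length := by
  induction l generalizing acc with
  | nil => simp
  | cons k l ih =>
    simp only [List.foldl_cons]
    refine le_trans ?_ (ih (pvStepB code acc k))
    unfold pvStepB
    split
    · rename_i h
      have := h.2
      simp only [PySem.Str.len_eq] at this
      omega
    · exact le_rfl

lemma foldA_inv (code : String) (codes : List String) (l : List Int)
    (hl : ∀ i ∈ l, 0 ≤ i) (acc : String)
    (hp : acc.toList <+: code.toList) (hm : acc = "" ∨ acc ∈ codes) :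
    (l.foldl (pvStepA code codes) acc).toList <+: code.toList ∧
      ((l.foldl (pvStepA code codes) acc) = "" ∨ (l.foldl (pvStepA code codes) acc) ∈ codes) := by
  induction l generalizing acc with
  | nil => exact ⟨hp, hm⟩
  | cons i l ih =>
    simp only [List.foldl_cons]
    refine ih (fun j hj => hl j (List.mem_cons_of_mem _ hj)) _ ?_ ?_
    · unfold pvStepA
      split
      · rw [slice_toList_of_nonneg code i (hl i List.mem_cons_self)]
        exact List.take_prefix _ _
      · exact hp
    · unfold pvStepA
      split
      · rename_i h
        exact Or.inr (by simpa using h.1)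
      · exact hm

lemma foldB_inv (code : String) (l : List String) (acc : String)
    (hp : acc.toList <+: code.toList) :
    (l.foldl (pvStepB code) acc).toList <+: code.toList := by
  induction l generalizing acc with
  | nil => exact hp
  | cons k l ih =>
    simp only [List.foldl_cons]
    refine ih _ ?_
    unfold pvStepB
    split
    · rename_i h
      exact (PySem.Chars.startswith_iff _ _).mp (by rw [← PySem.Str.startswith_eq]; exact h.1)
    · exact hp

lemma foldB_result (code : String) (l : List String) (acc : String) :
    (l.foldl (pvStepB code) acc) = acc ∨ (l.foldl (pvStepB code) acc) ∈ l := by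
  induction l generalizing acc with
  | nil => exact Or.inl rfl
  | cons k l ih =>
    simp only [List.foldl_cons]
    rcases ih (pvStepB code acc k) with h | h
    · rw [h]
      unfold pvStepB
      split
      · exact Or.inr List.mem_cons_self
      · exact Or.inl rfl
    · exact Or.inr (List.mem_cons_of_mem _ h)

lemma foldB_max (code : String) (l : List String) (acc : String) :
    ∀ k ∈ l, k.toList <+: code.toList →
      k.toList.length ≤ ((l.foldl (pvStepB code) acc)).toList.length := by
  induction l generalizing acc with
  | nil => simp
  | cons k' l ih =>
    intro k hk hkpre
    simp only [List.foldl_cons]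
    rcases List.mem_cons.mp hk with rfl | hk
    · unfold pvStepB
      split
      · refine le_trans ?_ (foldB_mono code l _)
        exact le_rfl
      · rename_i h
        have hsw : PySem.Str.startswith code k = true := by
          rw [PySem.Str.startswith_eq]
          exact (PySem.Chars.startswith_iff _ _).mpr hkpre
        have hlen : ¬ PySem.Str.len k > PySem.Str.len acc := fun hgt => h ⟨hsw, hgt⟩
        simp only [PySem.Str.len_eq, not_lt] at hlen
        refine le_trans ?_ (foldB_mono code l acc)
        omega
    · exact ih _ k hk hkpre

lemma prefix_eq_of_len_eq (code : String) (a b : String)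
    (ha : a.toList <+: code.toList) (hb : b.toList <+: code.toList)
    (hlen : a.toList.length = b.toList.length) : a = b := by
  rw [← String.toList_inj]
  rw [List.prefix_iff_eq_take.mp ha, List.prefix_iff_eq_take.mp hb, hlen]

lemma foldA_max (code : String) (decodings : List (String × String)) :
    ∀ k ∈ decodings.map Prod.fst, k.toList <+: code.toList →
      k.toList.length ≤ (nextLetterCode code decodings).toList.length := by
  intro k hk hkpre
  rw [nextLetterCode_eq_fold]
  set codes := decodings.map Prod.fst with hcodes
  by_cases hz : k.toList.length = 0
  · omega
  · set m : Nat := k.toList.length with hm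
    have hmn : m ≤ code.toList.length := hkpre.length_le
    have h1 : (1 : Int) ≤ (m : Int) := by omega
    have hstep1 : PySem.List.pyRange 0 (code.toList.length : Int) 1 =
        PySem.List.pyRange 0 ((m : Int) - 1) 1 ++
          PySem.List.pyRange ((m : Int) - 1) (code.toList.length : Int) 1 :=
      PySem.List.pyRange_one_append 0 ((m : Int) - 1) (code.toList.length : Int)
        (by omega) (by omega)
    have hstep2 : PySem.List.pyRange ((m : Int) - 1) (code.toList.length : Int) 1 =
        ((m : Int) - 1) :: PySem.List.pyRange (((m : Int) - 1) + 1) (code.toList.length : Int) 1 :=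
      PySem.List.pyRange_one_cons (by omega)
    have hm1 : ((m : Int) - 1) + 1 = (m : Int) := by omega
    have hsplit : PySem.List.pyRange 0 (PySem.Str.len code) 1 =
        PySem.List.pyRange 0 ((m : Int) - 1) 1 ++ ((m : Int) - 1) ::
          PySem.List.pyRange (m : Int) (PySem.Str.len code) 1 := by
      rw [PySem.Str.len_eq, hstep1, hstep2, hm1]
    rw [hsplit, List.foldl_append, List.foldl_cons]
    set acc0 := (PySem.List.pyRange 0 ((m : Int) - 1) 1).foldl (pvStepA code codes) ""
    refine le_trans ?_ (foldA_mono code codes _ _)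
    -- after processing index m-1 the accumulator has length ≥ m
    have hcval : (PySem.Str.slice code (some 0) (some (((m : Int) - 1) + 1))).toList = k.toList := by
      rw [slice_toList_of_nonneg code ((m : Int) - 1) (by omega)]
      have : ((m : Int) - 1 + 1).toNat = m := by omega
      rw [this, ← List.prefix_iff_eq_take.mp hkpre]
    have hceq : PySem.Str.slice code (some 0) (some (((m : Int) - 1) + 1)) = k :=
      String.toList_inj.mp hcval
    unfold pvStepA
    rw [hceq]
    split
    · exact le_rfl
    · rename_i h
      have hcontains : codes.contains k = true := by simpa using hk
      have : ¬ PySem.Str.len k > PySem.Str.len acc0 := fun hgt => h ⟨hcontains, hgt⟩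
      simp only [PySem.Str.len_eq, not_lt] at this
      omega

theorem nextLetterCode_eq (code : String) (decodings : List (String × String)) :
    nextLetterCode code decodings = nextLetterCode_alt code decodings := by
  set ks := decodings.map Prod.fst with hks
  have hnil : ("" : String).toList = [] := rfl
  have hA := foldA_inv code ks (PySem.List.pyRange 0 (PySem.Str.len code) 1)
    (fun i hi => ((PySem.List.mem_pyRange_one).mp hi).1) ""
    (by rw [hnil]; exact List.nil_prefix) (Or.inl rfl)
  rw [← nextLetterCode_eq_fold] at hA
  have hBpre := foldB_inv code ks "" (by rw [hnil]; exact List.nil_prefix)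
  have hBmem := foldB_result code ks ""
  rw [← nextLetterCode_alt_eq_fold] at hBpre hBmem
  have hAB : (nextLetterCode code decodings).toList.length ≤
      (nextLetterCode_alt code decodings).toList.length := by
    rcases hA.2 with h | h
    · rw [h, hnil]; simp
    · have := foldB_max code ks "" (nextLetterCode code decodings) h hA.1
      rw [← nextLetterCode_alt_eq_fold] at this
      exact this
  have hBA : (nextLetterCode_alt code decodings).toList.length ≤
      (nextLetterCode code decodings).toList.length := by
    rcases hBmem with h | h
    · rw [h, hnil]; simp
    · exact foldA_max code decodings _ h hBpre
  exact prefix_eq_of_len_eq code _ _ hA.1 hBpre (by omega)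

-- ===== VERDICT (by name: the statement is the Claim_ definition above) =====
theorem nextLetterCode_spec : Claim_equal_nextLetterCode := by
  intro code decodings _
  exact nextLetterCode_eq code decodings
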